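-- pv_equiv track=rewrite | github.com/ChristianMertes/A342585 | plot_sequence.py | aupton
-- ===== SOURCE A (Python) =====
-- from collections import Counter
--
-- def aupton(target: int):
--     """adapted from Michael S. Branicky's code from Jun 12 2021"""
--     num: int = 0
--     alst: list[int] = [0]
--     inventory: Counter[int] = Counter([0])
--     for _ in range(2, target + 1):
--         c = inventory[num]
--         num = 0 if c == 0 else num + 1
--         alst.append(c)
--         inventory.update([c])
--     return alst
-- ===== SOURCE B (Python) =====
-- def aupton(target: int):
--     """Inventory sequence built row by row: each row lists counts[0], counts[1], ...
--     up to (and including) the first zero count, over a plain integer-indexed count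
--     array grown on demand; rows are collected and flattened at the end."""
--     rows = [[0]]   # the sequence, organized as inventory rows
--     counts = [1]   # counts[v] = occurrences of value v so far
--     total = 1
--     while total < target:
--         row = []
--         v = 0
--         while total + len(row) < target:
--             c = counts[v] if v < len(counts) else 0
--             row.append(c)
--             if c >= len(counts):
--                 counts.extend([0] * (c + 1 - len(counts)))
--             counts[c] += 1
--             if c == 0:
--                 break
--             v += 1
--         rows.append(row)
--         total += len(row)
--     return [x for row in rows for x in row]
-- ===== Notes on version B (the rewrite author's own statement) =====
-- stated objective: alternative
-- what changed: Replaces the Counter plus mutable num state threaded through one counted loop by row-wise generation over a plain integer-indexed count array grown on demand, collecting complete inventory rows and flattening them at the end.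
import Mathlib
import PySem

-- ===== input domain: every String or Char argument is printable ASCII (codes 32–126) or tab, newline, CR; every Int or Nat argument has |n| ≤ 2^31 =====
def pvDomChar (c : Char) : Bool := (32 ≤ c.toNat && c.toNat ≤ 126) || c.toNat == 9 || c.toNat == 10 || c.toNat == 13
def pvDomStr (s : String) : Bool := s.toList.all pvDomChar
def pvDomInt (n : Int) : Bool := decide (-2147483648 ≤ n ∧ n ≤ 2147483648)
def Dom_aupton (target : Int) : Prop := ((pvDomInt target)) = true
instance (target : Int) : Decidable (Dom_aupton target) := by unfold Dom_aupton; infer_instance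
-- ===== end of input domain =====

-- B replaces A's Counter + threaded num state by row-wise generation over an integer-indexed
-- count array, collecting rows and flattening at the end (objective: alternative, same cost).

-- ===== PORT A =====
-- loop body of A's for-loop: c = inventory[num]; num = 0 if c == 0 else num + 1;
-- alst.append(c); inventory.update([c])
def auptonStep (st : Int × List Int × PySem.Dict Int Int) : Int × List Int × PySem.Dict Int Int :=
  let c := st.2.2.getD st.1 0
  (if c = 0 then 0 else st.1 + 1, st.2.1 ++ [c], st.2.2.modify c 0 (· + 1))

def aupton (target : Int) : List Int :=
  ((PySem.List.pyRange 2 (target + 1) 1).foldl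
    (fun st _ => auptonStep st) (0, [0], PySem.Dict.counter [0])).2.1

-- ===== PORT B =====
-- Source B: 'if c >= len(counts): counts.extend([0] * (c + 1 - len(counts)))'
def auptonExtend (counts : List Int) (c : Int) : List Int :=
  if (counts.length : Int) ≤ c then counts ++ List.replicate (c + 1 - counts.length).toNat 0
  else counts

-- Source B: 'counts[c] += 1' (after the extension c is in range; c is a count, hence ≥ 0)
def auptonBump (counts : List Int) (c : Int) : List Int :=
  let cs := auptonExtend counts c
  cs.set c.toNat (cs.getD c.toNat 0 + 1)

-- the inner while of Source B; fuel = target - total - len(row) (the guard), v the scanned value;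
-- 'counts[v] if v < len(counts) else 0' is counts.getD v 0
def auptonAltInner : Nat → Nat → List Int → List Int → List Int × List Int
  | 0, _, row, counts => (row, counts)
  | fuel + 1, v, row, counts =>
    let c := counts.getD v 0
    let counts' := auptonBump counts c
    if c = 0 then (row ++ [c], counts')
    else auptonAltInner fuel (v + 1) (row ++ [c]) counts'

theorem auptonAltInner_len_mono : ∀ (fuel v : Nat) (row counts : List Int),
    row.length ≤ (auptonAltInner fuel v row counts).1.length := by
  intro fuel
  induction fuel with
  | zero => intro v row counts; simp [auptonAltInner]
  | succ m ih =>
    intro v row counts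
    simp only [auptonAltInner]
    split
    · simp
    · have h := ih (v + 1) (row ++ [counts.getD v 0]) (auptonBump counts (counts.getD v 0))
      simp only [List.length_append, List.length_cons, List.length_nil] at h
      omega

theorem auptonAltInner_len (fuel v : Nat) (row counts : List Int) :
    row.length + 1 ≤ (auptonAltInner (fuel + 1) v row counts).1.length := by
  simp only [auptonAltInner]
  split
  · simp
  · have h := auptonAltInner_len_mono fuel (v + 1) (row ++ [counts.getD v 0])
      (auptonBump counts (counts.getD v 0))
    simp only [List.length_append, List.length_cons, List.length_nil] at h
    omega

-- the outer while of Source B; fuel = target - total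
def auptonAltOuter : Nat → List (List Int) → List Int → List (List Int)
  | 0, rows, _ => rows
  | fuel + 1, rows, counts =>
    let r := auptonAltInner (fuel + 1) 0 [] counts
    auptonAltOuter (fuel + 1 - r.1.length) (rows ++ [r.1]) r.2
  decreasing_by
    have := auptonAltInner_len fuel 0 [] counts
    omega

def aupton_alt (target : Int) : List Int :=
  (auptonAltOuter (target - 1).toNat [[0]] [1]).flatten

-- ===== PRECONDITION & SPEC =====
def Spec_aupton (target : Int) (out : List Int) : Prop := out = aupton_alt target
instance (target : Int) (out : List Int) : Decidable (Spec_aupton target out) := by unfold Spec_aupton; infer_instance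

-- ===== CLAIM =====
def Claim_equal_aupton : Prop := ∀ (target : Int), Dom_aupton target → Spec_aupton target (aupton target)

-- ===== LEMMAS AND PROOFS =====

-- A's loop counted by number of iterations
def stepN : Nat → Int × List Int × PySem.Dict Int Int → List Int
  | 0, s => s.2.1
  | n + 1, s => stepN n (auptonStep s)

theorem foldl_stepN (l : List Int) :
    ∀ s, ((l.foldl (fun st _ => auptonStep st) s)).2.1 = stepN l.length s := by
  induction l with
  | nil => intro s; rfl
  | cons a l ih => intro s; simpa [List.foldl, stepN] using ih (auptonStep s)

-- padding with zeros changes no getD-with-default-0 read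
theorem getD_append_replicate_zero (l : List Int) (k j : Nat) :
    (l ++ List.replicate k (0 : Int)).getD j 0 = l.getD j 0 := by
  rcases Nat.lt_or_ge j l.length with h | h
  · rw [List.getD_eq_getElem?_getD, List.getElem?_append_left h, ← List.getD_eq_getElem?_getD]
  · rw [List.getD_eq_getElem?_getD, List.getD_eq_getElem?_getD,
      List.getElem?_append_right h, List.getElem?_eq_none h, List.getElem?_replicate]
    split <;> simp

theorem getD_auptonExtend (counts : List Int) (c : Int) (j : Nat) :
    (auptonExtend counts c).getD j 0 = counts.getD j 0 := by
  unfold auptonExtend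
  split
  · exact getD_append_replicate_zero counts _ j
  · rfl

theorem length_auptonExtend (counts : List Int) (c : Int) (hc : 0 ≤ c) :
    c.toNat < (auptonExtend counts c).length := by
  unfold auptonExtend
  split
  · rename_i h
    simp only [List.length_append, List.length_replicate]
    omega
  · rename_i h
    omega

theorem getD_auptonBump (counts : List Int) (c : Int) (hc : 0 ≤ c) (j : Nat) :
    (auptonBump counts c).getD j 0 =
      counts.getD j 0 + (if (j : Int) = c then 1 else 0) := by
  unfold auptonBump
  have hlen := length_auptonExtend counts c hc
  rw [List.getD_eq_getElem?_getD, List.getElem?_set]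
  by_cases hj : c.toNat = j
  · rw [if_pos hj, if_pos hlen, if_pos (show (j : Int) = c by omega)]
    simp only [Option.getD_some]
    rw [getD_auptonExtend, hj]
  · rw [if_neg hj, ← List.getD_eq_getElem?_getD, getD_auptonExtend]
    rw [if_neg (show ¬ ((j : Int) = c) by omega)]
    omega

theorem nonneg_auptonBump (counts : List Int) (c : Int) (hc : 0 ≤ c)
    (h : ∀ j : Nat, 0 ≤ counts.getD j 0) : ∀ j : Nat, 0 ≤ (auptonBump counts c).getD j 0 := by
  intro j
  rw [getD_auptonBump counts c hc j]
  have := h j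
  split <;> omega

-- the coupling invariant between A's Counter and B's count array
def CntInv (inv : PySem.Dict Int Int) (counts : List Int) : Prop :=
  (∀ w : Int, 0 ≤ w → inv.getD w 0 = counts.getD w.toNat 0) ∧ (∀ j : Nat, 0 ≤ counts.getD j 0)

theorem cntInv_step (inv : PySem.Dict Int Int) (counts : List Int) (c : Int)
    (hc : 0 ≤ c) (h : CntInv inv counts) :
    CntInv (inv.modify c 0 (· + 1)) (auptonBump counts c) := by
  obtain ⟨h1, h2⟩ := h
  constructor
  · intro w hw
    rw [PySem.Dict.getD_modify, getD_auptonBump counts c hc]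
    have hwt : ((w.toNat : Int)) = w := Int.toNat_of_nonneg hw
    by_cases hwc : w = c
    · rw [if_pos hwc, if_pos (hwt.trans hwc), h1 c hc, hwc]
    · rw [if_neg hwc, if_neg (fun hh => hwc (hwt ▸ hh)), h1 w hw]
      omega
  · exact nonneg_auptonBump counts c hc h2

-- flattened result of the remaining outer iterations
def outFlat (fuel : Nat) (rows : List (List Int)) (counts : List Int) : List Int :=
  (auptonAltOuter fuel rows counts).flatten

-- one outer round, at the flattened level (valid also at fuel 0, where the extra row is empty)
theorem outFlat_unfold (n : Nat) (rows : List (List Int)) (counts : List Int) :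
    outFlat n rows counts =
      (fun r => outFlat (n - r.1.length) (rows ++ [r.1]) r.2)
        (auptonAltInner n 0 [] counts) := by
  cases n with
  | zero => simp [outFlat, auptonAltOuter, auptonAltInner]
  | succ m =>
    show outFlat (m + 1) rows counts = _
    rw [outFlat, auptonAltOuter]
    rfl

-- beta-reduced, symmetric form of outFlat_unfold, as it appears after rewriting
theorem outFlat_unfold' (n : Nat) (rows : List (List Int)) (counts : List Int) :
    outFlat (n - (auptonAltInner n 0 [] counts).1.length)
      (rows ++ [(auptonAltInner n 0 [] counts).1]) (auptonAltInner n 0 [] counts).2 =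
      outFlat n rows counts := by
  conv_rhs => rw [outFlat_unfold n rows counts]

-- the main simulation: A's next n single steps equal B's inner run continued by the outer loop
theorem stepN_eq_inner : ∀ (n : Nat) (v : Nat) (rows : List (List Int)) (row counts : List Int)
    (inv : PySem.Dict Int Int), CntInv inv counts →
    stepN n ((v : Int), rows.flatten ++ row, inv) =
      (fun r => outFlat (n - (r.1.length - row.length)) (rows ++ [r.1]) r.2)
        (auptonAltInner n v row counts) := by
  intro n
  induction n with
  | zero =>
    intro v rows row counts inv _
    simp [stepN, auptonAltInner, outFlat, auptonAltOuter]
  | succ m ih =>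
    intro v rows row counts inv hInv
    set c : Int := counts.getD v 0 with hcdef
    have hc : inv.getD (v : Int) 0 = c := by
      have := hInv.1 (v : Int) (by omega)
      simpa using this
    have hcnn : 0 ≤ c := hInv.2 v
    have hInv' : CntInv (inv.modify c 0 (· + 1)) (auptonBump counts c) :=
      cntInv_step inv counts c hcnn hInv
    rw [stepN]
    have hstep : auptonStep ((v : Int), rows.flatten ++ row, inv) =
        (if c = 0 then 0 else (v : Int) + 1, rows.flatten ++ row ++ [c],
          inv.modify c 0 (· + 1)) := by
      simp [auptonStep, hc]
    rw [hstep]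
    simp only [auptonAltInner, ← hcdef]
    by_cases hc0 : c = 0
    · -- round ends: A resets num to 0; B closes the row and re-enters the outer loop
      simp only [hc0, if_true]
      have hih := ih 0 (rows ++ [row ++ [(0 : Int)]]) [] (auptonBump counts 0)
        (inv.modify 0 0 (· + 1)) (hc0 ▸ hInv')
      simp only [Nat.cast_zero, List.append_nil, List.length_nil, Nat.sub_zero] at hih
      have hflat : rows.flatten ++ row ++ [(0 : Int)] = (rows ++ [row ++ [0]]).flatten := by
        simp
      rw [hflat, hih, outFlat_unfold' m (rows ++ [row ++ [0]]) (auptonBump counts 0)]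
      have harith : m + 1 - ((row ++ [(0 : Int)]).length - row.length) = m := by
        simp
      rw [harith]
    · -- round continues: A increments num; B appends to the current row
      simp only [if_neg hc0]
      have hih := ih (v + 1) rows (row ++ [c]) (auptonBump counts c)
        (inv.modify c 0 (· + 1)) hInv'
      push_cast at hih
      have hassoc : rows.flatten ++ row ++ [c] = rows.flatten ++ (row ++ [c]) := by simp
      rw [hassoc, hih]
      have hmono := auptonAltInner_len_mono m (v + 1) (row ++ [c]) (auptonBump counts c)
      have harith : m - ((auptonAltInner m (v + 1) (row ++ [c]) (auptonBump counts c)).1.length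
            - (row ++ [c]).length) =
          m + 1 - ((auptonAltInner m (v + 1) (row ++ [c]) (auptonBump counts c)).1.length
            - row.length) := by
        simp only [List.length_append, List.length_cons, List.length_nil] at hmono ⊢
        omega
      rw [harith]

theorem aupton_eq_alt (target : Int) : aupton target = aupton_alt target := by
  unfold aupton aupton_alt
  rw [foldl_stepN, PySem.List.length_pyRange_one]
  have h : (target + 1 - 2).toNat = (target - 1).toNat := by omega
  rw [h]
  have hInv : CntInv (PySem.Dict.counter [0]) [1] := by
    constructor
    · intro w hw
      rw [PySem.Dict.getD_counter]
      by_cases hw0 : w = 0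
      · subst hw0; decide
      · have h1 : 1 ≤ w.toNat := by omega
        have hne : (0 : Int) ≠ w := fun hh => hw0 hh.symm
        rw [List.getD_eq_getElem?_getD,
          List.getElem?_eq_none (by simpa using h1 : ([(1 : Int)].length ≤ w.toNat))]
        simp [hne]
    · intro j
      rcases j with _ | j <;> simp
  have hmain := stepN_eq_inner (target - 1).toNat 0 [[0]] [] [1] (PySem.Dict.counter [0]) hInv
  simp only [Nat.cast_zero, List.append_nil, List.length_nil, Nat.sub_zero,
    List.flatten_cons, List.flatten_nil] at hmain
  rw [hmain, outFlat_unfold' (target - 1).toNat [[0]] [1]]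
  rfl

-- ===== VERDICT =====
theorem aupton_spec : Claim_equal_aupton := by
  intro target _
  exact aupton_eq_alt target
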